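-- pv_equiv track=rewrite | github.com/ribo0715/algorithm_solution | 프로그래머스/괄호 변환.py | make_right
-- ===== SOURCE A (Python) =====
-- def is_right(u):
--     if not u:
--         return True
--
--     stack = []
--     if u[0] == ")":
--         return False
--     else:
--         stack.append("(")  # "("
--
--     for i in range(1, len(u)):
--         if not stack:  # stack이 비어있는 경우
--             if u[i] == ")":
--                 return False
--             else:
--                 stack.append("(")
--
--         elif stack[-1] == "(":
--             if u[i] == "(":
--                 stack.append("(")
--             else:  # ")"
--                 stack.pop()
--
--     if stack:
--         return False
--     else:
--         return True
--
-- def make_right(w):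
--     result = ""
--     if not w:  # 1.
--         return result
--
--     # 2.
--     count = 0
--     index = 0
--     for i in range(len(w)):
--         if w[i] == "(":
--             count += 1
--         else:
--             count -= 1
--
--         if count == 0:
--             index = i
--             break  # 가장 빨리 균형이 잡히는 순간 -> index번째까지 균형잡힌 괄호 문자열
--
--     u = w[:index + 1]
--     v = w[index + 1:]
--
--     if is_right(u):  # 3. u가 "올바른 괄호 문자열"인 경우
--         result += u
--         result += make_right(v)
--
--     else:  # 4. u가 "올바른 괄호 문자열"이 아닌 경우
--         temp = "("
--         temp += make_right(v)
--         temp += ")"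
--
--         u = u[1:-1]
--         for i in range(len(u)):
--             if u[i] == "(":
--                 temp += ")"
--             else:
--                 temp += "("
--
--         result = temp
--
--     return result
-- ===== SOURCE B (Python) =====
-- # Alternative decomposition: iterative segmentation + right fold, balance-based validity check.
-- def _valid(s):
--     bal = 0
--     for ch in s:
--         bal += 1 if ch == "(" else -1
--         if bal < 0:
--             return False
--     return bal == 0
--
-- def make_right(w):
--     segs = []
--     s = w
--     while s:
--         bal = 0
--         cut = None
--         for k, ch in enumerate(s):
--             bal += 1 if ch == "(" else -1
--             if bal == 0:
--                 cut = k + 1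
--                 break
--         if cut is None:
--             cut = 1
--         segs.append(s[:cut])
--         s = s[cut:]
--     acc = ""
--     for seg in reversed(segs):
--         if _valid(seg):
--             acc = seg + acc
--         else:
--             acc = "(" + acc + ")" + "".join(")" if c == "(" else "(" for c in seg[1:-1])
--     return acc
-- ===== Notes on version B (the rewrite author's own statement) =====
-- stated objective: alternative
-- what changed: B replaces A's recursive split-and-recurse with an iterative two-phase algorithm: first peel all segments left-to-right into a list, then assemble the result with a single right-to-left fold, and replaces A's stack-machine validity check by a running-balance check.
import Mathlib
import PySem

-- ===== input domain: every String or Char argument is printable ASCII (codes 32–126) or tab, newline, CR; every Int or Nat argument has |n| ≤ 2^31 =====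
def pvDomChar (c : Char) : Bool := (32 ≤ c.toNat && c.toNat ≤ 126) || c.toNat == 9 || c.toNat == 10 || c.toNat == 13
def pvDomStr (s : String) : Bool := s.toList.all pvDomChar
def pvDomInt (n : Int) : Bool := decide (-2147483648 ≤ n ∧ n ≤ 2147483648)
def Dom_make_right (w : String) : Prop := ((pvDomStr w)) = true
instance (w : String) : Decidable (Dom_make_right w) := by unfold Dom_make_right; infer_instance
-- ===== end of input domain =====

-- B replaces A's recursive split-and-recurse with iterative segmentation plus a right-to-left fold
-- and a running-balance validity check (objective: alternative decomposition, same cost).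


-- ===== PORT A =====
-- the for-loop of is_right (list front = top of the Python stack)
def goIsRight : List Char → List Char → Bool
  | [], stack => stack.isEmpty
  | c :: cs, stack =>
    match stack with
    | [] => if c = ')' then false else goIsRight cs ['(']
    | top :: rest =>
      if top = '(' then
        (if c = '(' then goIsRight cs ('(' :: top :: rest) else goIsRight cs rest)
      else goIsRight cs (top :: rest)

def is_right (u : List Char) : Bool :=
  match u with
  | [] => true
  | c :: cs => if c = ')' then false else goIsRight cs ['(']

-- the count/index/break search loop of make_right (index defaults to 0 when the balance never hits 0)
def goFind : List Char → Int → Nat → Nat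
  | [], _, _ => 0
  | c :: cs, count, i =>
    if count + (if c = '(' then 1 else -1) = 0 then i
    else goFind cs (count + (if c = '(' then 1 else -1)) (i + 1)

-- the character-flipping append loop of make_right's else branch
def flipA (temp : List Char) (u : List Char) : List Char :=
  List.foldl (fun t c => t ++ [if c = '(' then ')' else '(']) temp u

def mrA (w : List Char) : List Char :=
  if h : w = [] then []
  else
    let index := goFind w 0 0
    let u := w.take (index + 1)
    let v := w.drop (index + 1)
    if is_right u then u ++ mrA v
    else flipA ('(' :: (mrA v ++ [')'])) ((u.drop 1).dropLast)
termination_by w.length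
decreasing_by
  all_goals
    simp only [List.length_drop]
    have := List.length_pos_of_ne_nil h
    omega

def make_right (w : String) : String := String.mk (mrA w.toList)

-- ===== PORT B =====
-- number of characters consumed up to and including the first point where the running balance hits 0
def cutLen : List Char → Int → Option Nat
  | [], _ => none
  | c :: cs, bal =>
    if bal + (if c = '(' then 1 else -1) = 0 then some 1
    else (cutLen cs (bal + (if c = '(' then 1 else -1))).map (· + 1)

-- needed by segmentsB's termination proof
theorem cutLen_pos : ∀ (cs : List Char) (bal : Int) (k : Nat), cutLen cs bal = some k → 1 ≤ k := by
  intro cs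
  induction cs with
  | nil => intro bal k h; simp [cutLen] at h
  | cons c cs ih =>
    intro bal k h
    simp only [cutLen] at h
    split at h <;> split at h
    all_goals
      first
        | (injection h with h; omega)
        | (simp only [Option.map_eq_some_iff] at h; obtain ⟨a, _, rfl⟩ := h; omega)

def cutB (s : List Char) : Nat := (cutLen s 0).getD 1

theorem cutB_pos (s : List Char) : 1 ≤ cutB s := by
  unfold cutB
  cases h : cutLen s 0 with
  | none => simp
  | some k => simpa using cutLen_pos _ _ _ h

def segmentsB (w : List Char) : List (List Char) :=
  if h : w = [] then []
  else w.take (cutB w) :: segmentsB (w.drop (cutB w))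
termination_by w.length
decreasing_by
  simp only [List.length_drop]
  have := List.length_pos_of_ne_nil h
  have := cutB_pos w
  omega

-- running-balance validity check (_valid in Source B)
def goValid : List Char → Int → Bool
  | [], bal => bal == 0
  | c :: cs, bal =>
    if bal + (if c = '(' then 1 else -1) < 0 then false
    else goValid cs (bal + (if c = '(' then 1 else -1))

def validB (s : List Char) : Bool := goValid s 0

def stepB (seg acc : List Char) : List Char :=
  if validB seg then seg ++ acc
  else '(' :: acc ++ ')' :: ((seg.drop 1).dropLast).map (fun c => if c = '(' then ')' else '(')

def mrB (w : List Char) : List Char := (segmentsB w).foldr stepB []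

def make_right_alt (w : String) : String := String.mk (mrB w.toList)

-- ===== PRECONDITION & SPEC =====
def Spec_make_right (w : String) (out : String) : Prop := out = make_right_alt w
instance (w : String) (out : String) : Decidable (Spec_make_right w out) := by unfold Spec_make_right; infer_instance

-- ===== CLAIM (what is proved, stated in full; the proofs are below) =====
def Claim_equal_make_right : Prop := ∀ (w : String), Dom_make_right w → Spec_make_right w (make_right w)

-- ===== LEMMAS AND PROOFS =====
theorem cutLen_some_le : ∀ (cs : List Char) (bal : Int) (k : Nat),
    cutLen cs bal = some k → k ≤ cs.length := by
  intro cs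
  induction cs with
  | nil => intro bal k h; simp [cutLen] at h
  | cons c cs ih =>
    intro bal k h
    simp only [cutLen] at h
    split at h <;> split at h
    all_goals
      first
        | (injection h with h; simp; omega)
        | (simp only [Option.map_eq_some_iff] at h; obtain ⟨a, ha, rfl⟩ := h;
           have := ih _ _ ha; simp; omega)

theorem cutLen_take : ∀ (cs : List Char) (bal : Int) (k : Nat),
    cutLen cs bal = some k → cutLen (cs.take k) bal = some k := by
  intro cs
  induction cs with
  | nil => intro bal k h; simp [cutLen] at h
  | cons c cs ih =>
    intro bal k h
    simp only [cutLen] at h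
    by_cases hz : bal + (if c = '(' then 1 else -1) = 0
    · rw [if_pos hz] at h
      injection h with h
      subst h
      simp [cutLen, hz]
    · rw [if_neg hz] at h
      simp only [Option.map_eq_some_iff] at h
      obtain ⟨a, ha, rfl⟩ := h
      simp only [List.take_succ_cons, cutLen]
      rw [if_neg hz, ih _ _ ha]
      rfl

theorem goFind_cutLen_none : ∀ (cs : List Char) (bal : Int) (i : Nat),
    cutLen cs bal = none → goFind cs bal i = 0 := by
  intro cs
  induction cs with
  | nil => intro bal i _; simp [goFind]
  | cons c cs ih =>
    intro bal i h
    simp only [cutLen] at h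
    simp only [goFind]
    by_cases hb : bal + (if c = '(' then 1 else -1) = 0
    · rw [if_pos hb] at h; exact absurd h (by simp)
    · rw [if_neg hb] at h
      rw [if_neg hb]
      exact ih _ _ (by simpa using h)

theorem goFind_cutLen_some : ∀ (cs : List Char) (bal : Int) (i : Nat) (k : Nat),
    cutLen cs bal = some k → goFind cs bal i + 1 = i + k := by
  intro cs
  induction cs with
  | nil => intro bal i k h; simp [cutLen] at h
  | cons c cs ih =>
    intro bal i k h
    simp only [cutLen] at h
    simp only [goFind]
    by_cases hb : bal + (if c = '(' then 1 else -1) = 0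
    · rw [if_pos hb] at h
      rw [if_pos hb]
      injection h with h
      omega
    · rw [if_neg hb] at h
      rw [if_neg hb]
      simp only [Option.map_eq_some_iff] at h
      obtain ⟨a, ha, rfl⟩ := h
      have := ih _ (i + 1) _ ha
      omega

theorem cut_eq (w : List Char) : goFind w 0 0 + 1 = cutB w := by
  unfold cutB
  cases h : cutLen w 0 with
  | none => rw [goFind_cutLen_none w 0 0 h]; rfl
  | some k =>
    have := goFind_cutLen_some w 0 0 k h
    simp only [Option.getD_some]
    omega

theorem flipA_eq_map : ∀ (u t : List Char),
    flipA t u = t ++ u.map (fun c => if c = '(' then ')' else '(') := by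
  intro u
  induction u with
  | nil => intro t; simp [flipA]
  | cons c cs ih =>
    intro t
    simp only [flipA, List.foldl_cons, List.map_cons]
    have := ih (t ++ [if c = '(' then ')' else '('])
    simp only [flipA] at this
    rw [this]
    simp

theorem goIsRight_pos : ∀ (cs : List Char) (n : Nat),
    cutLen cs ((n : Int) + 1) = some cs.length → goIsRight cs (List.replicate (n + 1) '(') = true := by
  intro cs
  induction cs with
  | nil => intro n h; simp [cutLen] at h
  | cons c cs ih =>
    intro n h
    simp only [cutLen, List.length_cons] at h
    simp only [List.replicate_succ, goIsRight, if_pos rfl]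
    by_cases hc : c = '('
    · simp only [hc, if_true, reduceIte] at h ⊢
      have hb : ((n : Int) + 1) + 1 ≠ 0 := by omega
      rw [if_neg hb] at h
      simp only [Option.map_eq_some_iff] at h
      obtain ⟨a, ha, hak⟩ := h
      have : a = cs.length := by omega
      subst this
      have ha' : cutLen cs (((n + 1 : Nat) : Int) + 1) = some cs.length := by
        have e : (((n + 1 : Nat) : Int) + 1) = ((n : Int) + 1) + 1 := by push_cast; ring
        rw [e]; exact ha
      have := ih (n + 1) ha'
      simpa [List.replicate_succ] using this
    · simp only [hc, if_false, reduceIte] at h ⊢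
      have hb : ((n : Int) + 1) + (-1) = (n : Int) := by ring
      rw [hb] at h
      cases n with
      | zero =>
        simp only [Nat.cast_zero, if_pos rfl] at h
        injection h with h
        have hcs : cs = [] := List.length_eq_zero_iff.mp (by omega)
        subst hcs
        simp [goIsRight]
      | succ m =>
        have hb2 : ((m + 1 : Nat) : Int) ≠ 0 := by push_cast; omega
        rw [if_neg hb2] at h
        simp only [Option.map_eq_some_iff] at h
        obtain ⟨a, ha, hak⟩ := h
        have : a = cs.length := by omega
        subst this
        have ha' : cutLen cs (((m : Nat) : Int) + 1) = some cs.length := by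
          have e : ((m : Int) + 1) = (((m + 1 : Nat) : Int)) := by push_cast; ring
          rw [e]; exact ha
        have := ih m ha'
        simpa [List.replicate_succ] using this

theorem goValid_pos : ∀ (cs : List Char) (n : Int),
    0 < n → cutLen cs n = some cs.length → goValid cs n = true := by
  intro cs
  induction cs with
  | nil => intro n _ h; simp [cutLen] at h
  | cons c cs ih =>
    intro n hn h
    simp only [cutLen, List.length_cons] at h
    simp only [goValid]
    by_cases hz : n + (if c = '(' then 1 else -1) = 0
    · rw [if_pos hz] at h
      injection h with h
      have hcs : cs = [] := List.length_eq_zero_iff.mp (by omega)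
      subst hcs
      rw [hz]
      simp [goValid]
    · rw [if_neg hz] at h
      simp only [Option.map_eq_some_iff] at h
      obtain ⟨a, ha, hak⟩ := h
      have : a = cs.length := by omega
      subst this
      have hpos : 0 < n + (if c = '(' then 1 else -1) := by
        by_cases hc : c = '(' <;> simp only [hc, reduceIte] at hz ⊢ <;> omega
      rw [if_neg (not_lt.mpr (le_of_lt hpos))]
      exact ih _ hpos ha

theorem goIsRight_neg : ∀ (cs : List Char) (m : Nat) (bal : Int),
    bal < 0 → bal + 2 ≤ (m : Int) → cutLen cs bal = some cs.length →
    goIsRight cs (List.replicate m '(') = false := by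
  intro cs
  induction cs with
  | nil => intro m bal _ _ h; simp [cutLen] at h
  | cons c cs ih =>
    intro m bal hneg hm h
    simp only [cutLen, List.length_cons] at h
    by_cases hz : bal + (if c = '(' then 1 else -1) = 0
    · -- end next char: forces c = '(' and bal = -1 and cs = []
      rw [if_pos hz] at h
      injection h with h
      have hcs : cs = [] := List.length_eq_zero_iff.mp (by omega)
      subst hcs
      have hc : c = '(' := by
        by_contra hc
        simp [hc] at hz
        omega
      have hbal : bal = -1 := by simp [hc] at hz; omega
      obtain ⟨m', rfl⟩ : ∃ m', m = m' + 1 := ⟨m - 1, by omega⟩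
      simp [List.replicate_succ, goIsRight, hc]
    · rw [if_neg hz] at h
      simp only [Option.map_eq_some_iff] at h
      obtain ⟨a, ha, hak⟩ := h
      have : a = cs.length := by omega
      subst this
      have hbneg : bal + (if c = '(' then 1 else -1) < 0 := by
        rcases lt_trichotomy (bal + (if c = '(' then 1 else -1)) 0 with h1 | h1 | h1
        · exact h1
        · exact absurd h1 hz
        · exfalso
          by_cases hc : c = '(' <;> simp [hc] at h1 <;> omega
      cases m with
      | zero =>
        simp only [List.replicate_zero, goIsRight]
        by_cases hc : c = ')'
        · rw [if_pos hc]
        · rw [if_neg hc]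
          have : goIsRight cs (List.replicate 1 '(') = false := by
            apply ih 1 _ hbneg _ ha
            have hc2 : (if c = '(' then (1 : Int) else -1) ≤ 1 := by
              by_cases hc2 : c = '(' <;> simp [hc2]
            push_cast
            omega
          simpa using this
      | succ m' =>
        simp only [List.replicate_succ, goIsRight, if_pos rfl]
        by_cases hc : c = '('
        · simp only [hc, reduceIte] at hbneg ha ⊢
          have : goIsRight cs (List.replicate (m' + 2) '(') = false := by
            apply ih (m' + 2) _ hbneg _ ha
            push_cast at hm ⊢
            omega
          simpa [List.replicate_succ] using this
        · simp only [hc, reduceIte] at hbneg ha ⊢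
          have : goIsRight cs (List.replicate m' '(') = false := by
            apply ih m' _ hbneg _ ha
            push_cast at hm ⊢
            omega
          simpa using this

theorem single_eq (c : Char) : is_right [c] = validB [c] := by
  simp only [is_right, validB, goValid, goIsRight]
  by_cases hc : c = ')'
  · simp [hc]
  · rw [if_neg hc]
    by_cases hc2 : c = '('
    · simp [hc2, goIsRight]
    · simp [hc2, goIsRight]

theorem isRight_eq_valid_of_cut (c : Char) (cs : List Char)
    (h : cutLen (c :: cs) 0 = some (cs.length + 1)) : is_right (c :: cs) = validB (c :: cs) := by
  simp only [cutLen] at h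
  by_cases hc : c = '('
  · simp only [hc, reduceIte] at h
    rw [if_neg (by norm_num)] at h
    simp only [Option.map_eq_some_iff] at h
    obtain ⟨a, ha, hak⟩ := h
    have : a = cs.length := by omega
    subst this
    have h1 : goIsRight cs (List.replicate 1 '(') = true := by
      apply goIsRight_pos cs 0
      simpa using ha
    have h2 : goValid cs 1 = true := by
      apply goValid_pos cs 1 one_pos
      simpa using ha
    simp only [is_right, validB, goValid, hc, reduceIte]
    rw [if_neg (by decide : ¬ ('(' : Char) = ')')]
    rw [if_neg (by norm_num : ¬ ((0 : Int) + 1 < 0))]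
    simp only [List.replicate_one] at h1
    rw [h1]
    norm_num at h2 ⊢
    exact h2
  · simp only [hc, reduceIte] at h
    rw [if_neg (by norm_num)] at h
    simp only [Option.map_eq_some_iff] at h
    obtain ⟨a, ha, hak⟩ := h
    have : a = cs.length := by omega
    subst this
    have ha' : cutLen cs (-1) = some cs.length := by simpa using ha
    simp only [is_right, validB, goValid]
    by_cases hc2 : c = ')'
    · simp [hc2, hc]
    · rw [if_neg hc2]
      have h1 : goIsRight cs (List.replicate 1 '(') = false := by
        apply goIsRight_neg cs 1 (-1) (by omega) (by norm_num) ha'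
      simp only [List.replicate_one] at h1
      rw [h1]
      simp only [hc, reduceIte]
      norm_num

theorem mr_eq : ∀ (w : List Char), mrA w = mrB w := by
  intro w
  induction hn : w.length using Nat.strong_induction_on generalizing w with
  | _ n ih =>
  subst hn
  by_cases hw : w = []
  · subst hw; simp [mrA, mrB, segmentsB]
  · rw [mrA, mrB, segmentsB]
    rw [dif_neg hw, dif_neg hw]
    simp only [List.foldr_cons]
    rw [← mrB]
    have hcut : goFind w 0 0 + 1 = cutB w := cut_eq w
    rw [hcut]
    have hk1 : 1 ≤ cutB w := cutB_pos w
    have hvless : (w.drop (cutB w)).length < w.length := by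
      simp only [List.length_drop]
      have : 0 < w.length := List.length_pos_of_ne_nil hw
      omega
    have ihv : mrA (w.drop (cutB w)) = mrB (w.drop (cutB w)) := ih _ hvless _ rfl
    have hjudge : is_right (w.take (cutB w)) = validB (w.take (cutB w)) := by
      unfold cutB
      cases hcl : cutLen w 0 with
      | none =>
        simp only [Option.getD_none]
        obtain ⟨c, cs, rfl⟩ := List.exists_cons_of_ne_nil hw
        simp only [List.take_succ_cons, List.take_zero]
        exact single_eq c
      | some k0 =>
        simp only [Option.getD_some]
        have htake := cutLen_take w 0 k0 hcl
        have hlen : (w.take k0).length = k0 := by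
          have := cutLen_some_le w 0 k0 hcl
          simp [List.length_take]
          omega
        have hne : w.take k0 ≠ [] := by
          intro h0
          rw [h0] at hlen
          simp at hlen
          have := cutLen_pos w 0 k0 hcl
          omega
        obtain ⟨d, ds, hds⟩ := List.exists_cons_of_ne_nil hne
        rw [hds] at htake hlen ⊢
        simp only [List.length_cons] at hlen
        apply isRight_eq_valid_of_cut d ds
        rw [htake, hlen]
    rw [hjudge]
    unfold stepB
    by_cases hv : validB (w.take (cutB w)) = true
    · rw [if_pos hv, if_pos hv, ihv]
    · rw [if_neg hv, if_neg hv, ihv]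
      rw [flipA_eq_map]
      simp

-- ===== VERDICT (by name: the statement is the Claim_ definition above) =====
theorem make_right_spec : Claim_equal_make_right := by
  intro w _
  unfold Spec_make_right make_right make_right_alt
  rw [mr_eq]
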